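-- pv_equiv track=rewrite | github.com/keing1/advent-of-code-2020 | day_20/jurassic_jigsaw.py | find_two_tile_matches
-- ===== SOURCE A (Python) =====
-- def calc_tile_boundaries_no_flips(tile_val):
-- 	boundary_list = [('top', tile_val[0]), ('bottom', tile_val[-1][::-1]),
-- 		('left', [tile_row[0] for tile_row in tile_val][::-1]),
-- 		('right', [tile_row[-1] for tile_row in tile_val])]
-- 	return boundary_list
--
-- def calc_tile_boundaries_with_flips(tile_val):
-- 	boundary_list = calc_tile_boundaries_no_flips(tile_val)
-- 	flipped_boundary_list = [(label + ' flipped', val[::-1])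
-- 		for (label, val) in boundary_list]
-- 	return boundary_list + flipped_boundary_list
--
-- def find_two_tile_matches(tile1_val, tile2_val):
-- 	tile1_boundary_list = calc_tile_boundaries_no_flips(tile1_val)
-- 	tile2_boundary_list = calc_tile_boundaries_with_flips(tile2_val)
--
-- 	match_list = []
-- 	for orientation_1 in tile1_boundary_list:
-- 		for orientation_2 in tile2_boundary_list:
-- 			if orientation_1[1] == orientation_2[1]:
-- 				match_list += [(orientation_1[0], orientation_2[0])]
-- 	return match_list
-- ===== SOURCE B (Python) =====
-- def _edges(tile_val):
--     return [('top', tile_val[0]),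
--             ('bottom', tile_val[-1][::-1]),
--             ('left', [row[0] for row in tile_val][::-1]),
--             ('right', [row[-1] for row in tile_val])]
--
-- def find_two_tile_matches(tile1_val, tile2_val):
--     # hash-join transposed w.r.t. A: index tile1's edges, stream tile2's edges,
--     # collect matches into per-tile1-label buckets, then emit buckets in tile1 order.
--     b1 = _edges(tile1_val)
--     index = {}
--     for l1, v1 in b1:
--         index.setdefault(tuple(v1), []).append(l1)
--     buckets = {l1: [] for l1, _ in b1}
--     e4 = _edges(tile2_val)
--     for l2, v2 in e4 + [(l + ' flipped', v[::-1]) for l, v in e4]: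
--         for l1 in index.get(tuple(v2), []):
--             buckets[l1].append((l1, l2))
--     out = []
--     for l1, _ in b1:
--         out += buckets[l1]
--     return out
-- ===== Notes on version B (the rewrite author's own statement) =====
-- stated objective: alternative
-- what changed: B replaces A's nested loop (tile1 edges outer, tile2's 8 edges inner, emitting in scan order) by a transposed hash-join: it indexes tile1's 4 edge values in a dict, streams tile2's 8 edges once against that index, accumulates hits into per-tile1-label buckets, and finally assembles the output by concatenating the buckets in tile1 order.
import Mathlib
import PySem

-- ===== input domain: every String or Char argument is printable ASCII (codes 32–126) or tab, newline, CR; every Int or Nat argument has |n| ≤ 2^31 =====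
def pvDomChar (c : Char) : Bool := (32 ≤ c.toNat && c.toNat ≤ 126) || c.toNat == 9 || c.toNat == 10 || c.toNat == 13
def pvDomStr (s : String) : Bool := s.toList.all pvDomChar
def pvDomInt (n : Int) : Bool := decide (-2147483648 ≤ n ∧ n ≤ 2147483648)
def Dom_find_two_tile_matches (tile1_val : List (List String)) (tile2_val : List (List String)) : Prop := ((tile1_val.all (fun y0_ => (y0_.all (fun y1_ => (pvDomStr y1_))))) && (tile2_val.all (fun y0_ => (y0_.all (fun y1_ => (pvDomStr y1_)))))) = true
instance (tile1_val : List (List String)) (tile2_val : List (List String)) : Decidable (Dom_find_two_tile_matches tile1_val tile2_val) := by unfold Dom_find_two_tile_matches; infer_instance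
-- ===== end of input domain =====

-- B is a transposed hash-join: it indexes tile1's edges in a dict, streams tile2's 8 edges against
-- the index into per-tile1-label buckets, and assembles the output by concatenating buckets in
-- tile1 order (objective: alternative — A's nested scan and emit-in-scan-order disappear).

-- ===== PORT A =====
def pvCalcTileBoundariesNoFlips (tile_val : List (List String)) : List (String × List String) :=
  [("top", PySem.List.pyGetD tile_val 0 []),
   ("bottom", (PySem.List.pyGetD tile_val (-1) []).reverse),
   ("left", (tile_val.map (fun row => PySem.List.pyGetD row 0 "")).reverse),
   ("right", tile_val.map (fun row => PySem.List.pyGetD row (-1) ""))]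

def pvCalcTileBoundariesWithFlips (tile_val : List (List String)) : List (String × List String) :=
  let boundary_list := pvCalcTileBoundariesNoFlips tile_val
  boundary_list ++ boundary_list.map (fun p => (p.1 ++ " flipped", p.2.reverse))

def find_two_tile_matches (tile1_val : List (List String)) (tile2_val : List (List String)) : List (String × String) :=
  let tile1_boundary_list := pvCalcTileBoundariesNoFlips tile1_val
  let tile2_boundary_list := pvCalcTileBoundariesWithFlips tile2_val
  tile1_boundary_list.foldl (fun match_list o1 =>
    tile2_boundary_list.foldl (fun match_list o2 =>
      if o1.2 == o2.2 then match_list ++ [(o1.1, o2.1)] else match_list) match_list) []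

-- ===== PORT B =====
def pvAltEdges (tile_val : List (List String)) : List (String × List String) :=
  [("top", PySem.List.pyGetD tile_val 0 []),
   ("bottom", (PySem.List.pyGetD tile_val (-1) []).reverse),
   ("left", (tile_val.map (fun row => PySem.List.pyGetD row 0 "")).reverse),
   ("right", tile_val.map (fun row => PySem.List.pyGetD row (-1) ""))]

def find_two_tile_matches_alt (tile1_val : List (List String)) (tile2_val : List (List String)) : List (String × String) :=
  let b1 := pvAltEdges tile1_val
  -- index.setdefault(tuple(v1), []).append(l1)  is exactly  Dict.modify v1 [] (· ++ [l1])
  let index := b1.foldl (fun d q => d.modify q.2 [] (· ++ [q.1])) PySem.Dict.empty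
  let buckets0 := b1.foldl (fun d q => d.insert q.1 ([] : List (String × String))) PySem.Dict.empty
  let e4 := pvAltEdges tile2_val
  let edges2 := e4 ++ e4.map (fun p => (p.1 ++ " flipped", p.2.reverse))
  let buckets := edges2.foldl (fun d p =>
      (index.getD p.2 []).foldl (fun d l1 => d.modify l1 [] (· ++ [(l1, p.1)])) d) buckets0
  b1.foldl (fun out q => out ++ buckets.getD q.1 []) []

-- ===== PRECONDITION & SPEC =====
-- Pre_ excludes exactly the inputs on which the Python A raises IndexError:
-- an empty tile or a tile containing an empty row (tile_val[0], tile_val[-1], row[0], row[-1]).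
def Pre_find_two_tile_matches (tile1_val : List (List String)) (tile2_val : List (List String)) : Prop :=
  tile1_val ≠ [] ∧ tile2_val ≠ [] ∧ (∀ row ∈ tile1_val, row ≠ []) ∧ (∀ row ∈ tile2_val, row ≠ [])
instance (tile1_val : List (List String)) (tile2_val : List (List String)) : Decidable (Pre_find_two_tile_matches tile1_val tile2_val) := by unfold Pre_find_two_tile_matches; infer_instance
def pvWitness_find_two_tile_matches : List (List String) × List (List String) :=
  ([["a", "b"], ["c", "d"]], [["a", "x"], ["y", "z"]])
def Spec_find_two_tile_matches (tile1_val : List (List String)) (tile2_val : List (List String)) (out : List (String × String)) : Prop := out = find_two_tile_matches_alt tile1_val tile2_val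
instance (tile1_val : List (List String)) (tile2_val : List (List String)) (out : List (String × String)) : Decidable (Spec_find_two_tile_matches tile1_val tile2_val out) := by unfold Spec_find_two_tile_matches; infer_instance

-- ===== CLAIM =====
def Claim_equal_find_two_tile_matches : Prop := ∀ (tile1_val : List (List String)) (tile2_val : List (List String)), Dom_find_two_tile_matches tile1_val tile2_val → Pre_find_two_tile_matches tile1_val tile2_val → Spec_find_two_tile_matches tile1_val tile2_val (find_two_tile_matches tile1_val tile2_val)

-- ===== LEMMAS AND PROOFS =====

-- A's nested scan, as a flatMap of a filter.
theorem pv_A_eq (t1 t2 : List (List String)) :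
    find_two_tile_matches t1 t2
      = (pvCalcTileBoundariesNoFlips t1).flatMap (fun o1 =>
          ((pvCalcTileBoundariesWithFlips t2).filter (fun o2 => o1.2 == o2.2)).map
            (fun o2 => (o1.1, o2.1))) := by
  unfold find_two_tile_matches
  simp only [PySem.List.foldl_append_if, PySem.List.foldl_append_eq_flatMap, List.nil_append]

-- The index-building loop: looking up v returns the labels of all tile1 edges with value v, in order.
theorem pv_index_getD (l : List (String × List String)) (d : PySem.Dict (List String) (List String)) (v : List String) :
    (l.foldl (fun d q => d.modify q.2 [] (· ++ [q.1])) d).getD v []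
      = d.getD v [] ++ (l.filter (fun q => q.2 == v)).map (·.1) := by
  have h := PySem.Dict.getD_foldl_modify_append
    (l := l.map (fun q : String × List String => (q.2, q.1))) (d := d) (c := v)
  rw [List.foldl_map] at h
  simpa [List.filter_map, Function.comp] using h

-- The bucket-append loop over a list of labels, observed at one label.
theorem pv_bucket_inner (ls : List String) (d : PySem.Dict String (List (String × String)))
    (L l2 : String) :
    (ls.foldl (fun d l1 => d.modify l1 [] (· ++ [(l1, l2)])) d).getD L []
      = d.getD L [] ++ (ls.filter (· == L)).map (fun l1 => (l1, l2)) := by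
  have h := PySem.Dict.getD_foldl_modify_append
    (l := ls.map (fun l1 => (l1, (l1, l2)))) (d := d) (c := L)
  rw [List.foldl_map] at h
  simpa [List.filter_map, Function.comp] using h

-- Generic accumulator lemma: an observation that appends per step turns a foldl into a flatMap.
theorem pv_foldl_flatMap {δ β α : Type} (f : δ → List α) (g : β → List α) (step : δ → β → δ)
    (h : ∀ d p, f (step d p) = f d ++ g p) :
    ∀ (l : List β) (d : δ), f (l.foldl step d) = f d ++ l.flatMap g := by
  intro l
  induction l with
  | nil => intro d; simp
  | cons p l ih => intro d; simp [List.foldl_cons, ih, h]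

theorem pv_flatMap_if {β α : Type} (l : List β) (q : β → Bool) (f : β → α) :
    l.flatMap (fun x => if q x then [f x] else []) = (l.filter q).map f := by
  induction l with
  | nil => rfl
  | cons x l ih => by_cases h : q x <;> simp [h, ih]

-- The whole bucket-filling loop, observed at one label L whose tile1 edge value is vL:
-- bucket L collects exactly the tile2 edges whose value equals vL, in stream order.
theorem pv_buckets_getD (idx : PySem.Dict (List String) (List String))
    (edges2 : List (String × List String)) (d : PySem.Dict String (List (String × String)))
    (L : String) (vL : List String)
    (hL : ∀ v, ((idx.getD v []).filter (· == L)) = if vL == v then [L] else []) :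
    (edges2.foldl (fun d p => (idx.getD p.2 []).foldl (fun d l1 => d.modify l1 [] (· ++ [(l1, p.1)])) d) d).getD L []
      = d.getD L [] ++ (edges2.filter (fun p => vL == p.2)).map (fun p => (L, p.1)) := by
  rw [pv_foldl_flatMap (f := fun d => PySem.Dict.getD d L [])
      (g := fun p => if vL == p.2 then [(L, p.1)] else [])]
  · rw [pv_flatMap_if]
  · intro d p
    rw [pv_bucket_inner, hL p.2]
    by_cases h : vL == p.2 <;> simp [h]

-- Filtering the ordered label list returned by the index, at each of the four fixed labels.
theorem pv_labels_top (tp bt lf rt v : List String) :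
    ((([("top",tp),("bottom",bt),("left",lf),("right",rt)] : List (String × List String)).filter
      (fun q => q.2 == v)).map (·.1)).filter (· == "top") = if tp == v then ["top"] else [] := by
  simp only [List.filter_cons, List.filter_nil]
  split_ifs <;> simp_all

theorem pv_labels_bottom (tp bt lf rt v : List String) :
    ((([("top",tp),("bottom",bt),("left",lf),("right",rt)] : List (String × List String)).filter
      (fun q => q.2 == v)).map (·.1)).filter (· == "bottom") = if bt == v then ["bottom"] else [] := by
  simp only [List.filter_cons, List.filter_nil]
  split_ifs <;> simp_all

theorem pv_labels_left (tp bt lf rt v : List String) :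
    ((([("top",tp),("bottom",bt),("left",lf),("right",rt)] : List (String × List String)).filter
      (fun q => q.2 == v)).map (·.1)).filter (· == "left") = if lf == v then ["left"] else [] := by
  simp only [List.filter_cons, List.filter_nil]
  split_ifs <;> simp_all

theorem pv_labels_right (tp bt lf rt v : List String) :
    ((([("top",tp),("bottom",bt),("left",lf),("right",rt)] : List (String × List String)).filter
      (fun q => q.2 == v)).map (·.1)).filter (· == "right") = if rt == v then ["right"] else [] := by
  simp only [List.filter_cons, List.filter_nil]
  split_ifs <;> simp_all

-- The index built over the four-edge list (as the unfolded modify chain), looked up at v.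
theorem pv_idx_lit (tp bt lf rt v : List String) :
    (((((PySem.Dict.empty : PySem.Dict (List String) (List String)).modify tp [] (· ++ ["top"])).modify bt []
        (· ++ ["bottom"])).modify lf [] (· ++ ["left"])).modify rt [] (· ++ ["right"])).getD v []
      = (([("top",tp),("bottom",bt),("left",lf),("right",rt)] : List (String × List String)).filter
          (fun q => q.2 == v)).map (·.1) := by
  have h := pv_index_getD ([("top",tp),("bottom",bt),("left",lf),("right",rt)]) PySem.Dict.empty v
  simp only [List.foldl_cons, List.foldl_nil, PySem.Dict.getD_empty, List.nil_append] at h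
  exact h

-- B's whole computation over the four literal tile1 edges equals A's flatMap/filter form.
theorem pv_main (tp bt lf rt : List String) (edges2 : List (String × List String)) :
    (let b1 : List (String × List String) := [("top",tp),("bottom",bt),("left",lf),("right",rt)]
     let index := b1.foldl (fun d q => d.modify q.2 [] (· ++ [q.1])) PySem.Dict.empty
     let buckets0 := b1.foldl (fun d q => d.insert q.1 ([] : List (String × String))) PySem.Dict.empty
     let buckets := edges2.foldl (fun d p =>
        (index.getD p.2 []).foldl (fun d l1 => d.modify l1 [] (· ++ [(l1, p.1)])) d) buckets0
     b1.foldl (fun out q => out ++ buckets.getD q.1 []) [])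
    = ([("top",tp),("bottom",bt),("left",lf),("right",rt)] : List (String × List String)).flatMap
        (fun o1 => (edges2.filter (fun o2 => o1.2 == o2.2)).map (fun o2 => (o1.1, o2.1))) := by
  simp only [List.foldl_cons, List.foldl_nil, List.nil_append, List.flatMap_cons, List.flatMap_nil,
    List.append_nil]
  rw [pv_buckets_getD _ _ _ "top" tp (fun v => by rw [pv_idx_lit]; exact pv_labels_top tp bt lf rt v),
      pv_buckets_getD _ _ _ "bottom" bt (fun v => by rw [pv_idx_lit]; exact pv_labels_bottom tp bt lf rt v),
      pv_buckets_getD _ _ _ "left" lf (fun v => by rw [pv_idx_lit]; exact pv_labels_left tp bt lf rt v),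
      pv_buckets_getD _ _ _ "right" rt (fun v => by rw [pv_idx_lit]; exact pv_labels_right tp bt lf rt v)]
  simp [PySem.Dict.getD_insert]

-- ===== VERDICT =====
theorem find_two_tile_matches_spec : Claim_equal_find_two_tile_matches := by
  intro t1 t2 _ _
  show _ = find_two_tile_matches_alt t1 t2
  rw [pv_A_eq]
  unfold find_two_tile_matches_alt
  rw [show pvAltEdges t1 = [("top", PySem.List.pyGetD t1 0 []),
        ("bottom", (PySem.List.pyGetD t1 (-1) []).reverse),
        ("left", (t1.map (fun row => PySem.List.pyGetD row 0 "")).reverse),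
        ("right", t1.map (fun row => PySem.List.pyGetD row (-1) ""))] from rfl]
  rw [pv_main]
  rfl
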